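-- pv_equiv track=rewrite | github.com/dnwls16071/Everyday-Algorithm | 프로그래머스/1/68644. 두 개 뽑아서 더하기/두 개 뽑아서 더하기.py | solution
-- ===== SOURCE A (Python) =====
-- def solution(numbers):
--     visited = [False] * len(numbers)
--     result = set()
--     def DFS(numbers, lst):
--         if len(lst) == 2:
--             result.add(sum(lst))
--             return
--         for i in range(len(numbers)):
--             if not visited[i]:
--                 visited[i] = True
--                 lst.append(numbers[i])
--                 DFS(numbers, lst)
--                 visited[i] = False
--                 lst.pop()
--         return result
--     result = DFS(numbers, [])
--     result = list(result)
--     result.sort()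
--     return result
-- ===== SOURCE B (Python) =====
-- def solution(numbers):
--     n = len(numbers)
--     result = set()
--     for i in range(n):
--         for j in range(i + 1, n):
--             result.add(numbers[i] + numbers[j])
--     return sorted(result)
-- ===== Notes on version B (the rewrite author's own statement) =====
-- stated objective: idiomatic
-- what changed: Replaced the recursive DFS over a visited array (which enumerates every ordered index pair) with a direct nested loop over unordered index pairs i<j added into a set, then sorted.
import Mathlib
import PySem

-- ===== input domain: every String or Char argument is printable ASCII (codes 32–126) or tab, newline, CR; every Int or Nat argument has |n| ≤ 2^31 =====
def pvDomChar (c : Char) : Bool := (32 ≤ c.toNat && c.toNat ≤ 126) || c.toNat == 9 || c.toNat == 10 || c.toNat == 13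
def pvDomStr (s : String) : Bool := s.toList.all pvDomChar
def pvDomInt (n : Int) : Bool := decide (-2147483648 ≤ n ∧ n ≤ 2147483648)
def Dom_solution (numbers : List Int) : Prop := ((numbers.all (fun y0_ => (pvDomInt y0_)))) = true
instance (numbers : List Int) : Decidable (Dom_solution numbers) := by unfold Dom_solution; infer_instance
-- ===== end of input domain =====

-- B replaces A's recursive DFS over a visited array (all ordered index pairs) with a direct
-- nested loop over unordered pairs i<j added into a set, then sorted — idiomatic, same value.

-- ===== PORT A =====
-- DFS(numbers, lst) with the mutable visited/result threaded through; fuel bounds the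
-- recursion depth (lst can only grow to length 2 before the base case fires).
def dfsA (numbers : List Int) (fuel : Nat) (visited : List Bool) (lst : List Int)
    (result : PySem.Set Int) : List Bool × PySem.Set Int :=
  if lst.length = 2 then
    (visited, PySem.Set.add result lst.sum)
  else
    match fuel with
    | 0 => (visited, result)
    | Nat.succ fuel' =>
      (PySem.List.pyRange 0 (PySem.List.len numbers)).foldl
        (fun st i =>
          if PySem.List.pyGetD st.1 i false = false then
            let st' := dfsA numbers fuel' (PySem.List.pySetD st.1 i true)
                        (lst ++ [PySem.List.pyGetD numbers i 0]) st.2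
            (PySem.List.pySetD st'.1 i false, st'.2)
          else st)
        (visited, result)

def solution (numbers : List Int) : List Int :=
  let visited := List.replicate numbers.length false
  let res := dfsA numbers 2 visited [] PySem.Set.empty
  PySem.List.sorted res.2 (fun x => x) false

-- ===== PORT B =====
def solution_alt (numbers : List Int) : List Int :=
  let n := PySem.List.len numbers
  let result :=
    (PySem.List.pyRange 0 n).foldl
      (fun r i =>
        (PySem.List.pyRange (i + 1) n).foldl
          (fun r j => PySem.Set.add r (PySem.List.pyGetD numbers i 0 + PySem.List.pyGetD numbers j 0))
          r)
      PySem.Set.empty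
  PySem.List.sorted result (fun x => x) false

-- ===== PRECONDITION & SPEC =====
def Spec_solution (numbers : List Int) (out : List Int) : Prop := out = solution_alt numbers
instance (numbers : List Int) (out : List Int) : Decidable (Spec_solution numbers out) := by unfold Spec_solution; infer_instance

-- ===== CLAIM (what is proved, stated in full; the proofs are below) =====
def Claim_equal_solution : Prop := ∀ (numbers : List Int), Dom_solution numbers → Spec_solution numbers (solution numbers)

-- ===== LEMMAS AND PROOFS =====

-- setting an already-false entry back to false is the identity
lemma set_false_self (v : List Bool) (k : Nat) (h : v.getD k false = false) :
    v.set k false = v := by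
  induction v generalizing k with
  | nil => simp
  | cons a t ih =>
    cases k with
    | zero => simp_all [List.getD]
    | succ k => simp_all [List.getD]

-- the visited array after marking index i: entry j reads false iff j ≠ i
lemma replicate_set_getD_iff (n i j : Nat) (hi : i < n) :
    (((List.replicate n false).set i true).getD j false = false) ↔ j ≠ i := by
  simp [List.getD, List.getElem?_set]
  by_cases h : i = j
  · subst h; simp [hi]
  · simp [h]; intro hh; omega

-- membership in a conditional-add fold
lemma mem_foldl_addIf {β : Type} (l : List β) (p : β → Prop) [DecidablePred p]
    (f : β → Int) (r : PySem.Set Int) (x : Int) :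
    (x ∈ l.foldl (fun r b => if p b then PySem.Set.add r (f b) else r) r) ↔
      x ∈ r ∨ ∃ b ∈ l, p b ∧ x = f b := by
  induction l generalizing r with
  | nil => simp
  | cons b t ih =>
    simp only [List.foldl_cons, List.exists_mem_cons_iff]
    by_cases hb : p b
    · rw [if_pos hb, ih, PySem.Set.mem_add]
      tauto
    · rw [if_neg hb, ih]
      tauto

lemma nodup_foldl_addIf {β : Type} (l : List β) (p : β → Prop) [DecidablePred p]
    (f : β → Int) (r : PySem.Set Int) (h : r.Nodup) :
    (l.foldl (fun r b => if p b then PySem.Set.add r (f b) else r) r).Nodup := by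
  induction l generalizing r with
  | nil => exact h
  | cons b t ih =>
    simp only [List.foldl_cons]
    split
    · exact ih _ (PySem.Set.nodup_add _ _ h)
    · exact ih _ h

-- membership / nodup of B's nested unconditional-add fold
lemma mem_foldl_foldl_add {β γ : Type} (lo : List β) (li : β → List γ) (f : β → γ → Int)
    (r : PySem.Set Int) (x : Int) :
    (x ∈ lo.foldl (fun r b => (li b).foldl (fun r c => PySem.Set.add r (f b c)) r) r) ↔
      x ∈ r ∨ ∃ b ∈ lo, ∃ c ∈ li b, x = f b c := by
  induction lo generalizing r with
  | nil => simp
  | cons b t ih =>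
    simp only [List.foldl_cons, List.exists_mem_cons_iff]
    rw [ih, PySem.Set.mem_foldl_add]
    exact or_assoc

lemma nodup_foldl_foldl_add {β γ : Type} (lo : List β) (li : β → List γ) (f : β → γ → Int)
    (r : PySem.Set Int) (h : r.Nodup) :
    (lo.foldl (fun r b => (li b).foldl (fun r c => PySem.Set.add r (f b c)) r) r).Nodup := by
  induction lo generalizing r with
  | nil => exact h
  | cons b t ih =>
    simp only [List.foldl_cons]
    apply ih
    have : ∀ (l : List γ) (r : PySem.Set Int), r.Nodup →
        ((l.foldl (fun r c => PySem.Set.add r (f b c)) r)).Nodup := by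
      intro l
      induction l with
      | nil => intro r hr; exact hr
      | cons c t2 ih2 => intro r hr; exact ih2 _ (PySem.Set.nodup_add _ _ hr)
    exact this _ _ h

-- membership / nodup of A's nested conditional fold
lemma mem_foldl_foldl_addIf {β γ : Type} (lo : List β) (li : β → List γ)
    (p : β → γ → Prop) [∀ b c, Decidable (p b c)] (f : β → γ → Int)
    (r : PySem.Set Int) (x : Int) :
    (x ∈ lo.foldl (fun r b => (li b).foldl (fun r c => if p b c then PySem.Set.add r (f b c) else r) r) r) ↔
      x ∈ r ∨ ∃ b ∈ lo, ∃ c ∈ li b, p b c ∧ x = f b c := by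
  induction lo generalizing r with
  | nil => simp
  | cons b t ih =>
    simp only [List.foldl_cons, List.exists_mem_cons_iff]
    rw [ih, mem_foldl_addIf]
    exact or_assoc

lemma nodup_foldl_foldl_addIf {β γ : Type} (lo : List β) (li : β → List γ)
    (p : β → γ → Prop) [∀ b c, Decidable (p b c)] (f : β → γ → Int)
    (r : PySem.Set Int) (h : r.Nodup) :
    (lo.foldl (fun r b => (li b).foldl (fun r c => if p b c then PySem.Set.add r (f b c) else r) r) r).Nodup := by
  induction lo generalizing r with
  | nil => exact h
  | cons b t ih =>
    simp only [List.foldl_cons]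
    exact ih _ (nodup_foldl_addIf _ _ _ _ h)

-- base case: a 2-element lst adds its sum and returns visited unchanged
lemma dfsA_two (numbers : List Int) (fuel : Nat) (v : List Bool) (a b : Int)
    (r : PySem.Set Int) :
    dfsA numbers fuel v [a, b] r = (v, PySem.Set.add r (a + b)) := by
  unfold dfsA
  simp

-- depth-1 loop: visited comes back unchanged, result gains a + numbers[j] for each unvisited j
lemma fold1_eq (numbers : List Int) (a : Int) (v : List Bool) :
    ∀ (l : List Nat) (r : PySem.Set Int),
    l.foldl (fun (st : List Bool × PySem.Set Int) (k : Nat) =>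
        if st.1.getD k false = false then
          ((dfsA numbers 0 (st.1.set k true) [a, numbers.getD k 0] st.2).1.set k false,
           (dfsA numbers 0 (st.1.set k true) [a, numbers.getD k 0] st.2).2)
        else st) (v, r)
      = (v, l.foldl (fun r j => if v.getD j false = false
                        then PySem.Set.add r (a + numbers.getD j 0) else r) r) := by
  intro l
  induction l with
  | nil => intro r; rfl
  | cons k t ih =>
    intro r
    simp only [List.foldl_cons]
    have hstep : (if (v.getD k false) = false then
        ((dfsA numbers 0 (v.set k true) [a, numbers.getD k 0] r).1.set k false,
         (dfsA numbers 0 (v.set k true) [a, numbers.getD k 0] r).2)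
      else (v, r))
        = (v, if v.getD k false = false then PySem.Set.add r (a + numbers.getD k 0) else r) := by
      by_cases hvk : v.getD k false = false
      · rw [if_pos hvk, if_pos hvk, dfsA_two]
        simp [List.set_set, set_false_self v k hvk]
      · rw [if_neg hvk, if_neg hvk]
    rw [hstep, ih]

lemma dfsA_one (numbers : List Int) (a : Int) (v : List Bool) (r : PySem.Set Int) :
    dfsA numbers 1 v [a] r =
      (v, (List.range numbers.length).foldl
            (fun r j => if v.getD j false = false
                        then PySem.Set.add r (a + numbers.getD j 0) else r) r) := by
  rw [show (1 : Nat) = Nat.succ 0 from rfl]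
  unfold dfsA
  rw [if_neg (by simp)]
  simp only [PySem.List.len_eq, PySem.List.pyRange_zero_nat, List.foldl_map,
    PySem.List.pyGetD_natCast, PySem.List.pySetD_natCast, List.singleton_append]
  exact fold1_eq numbers a v _ r

-- top-level loop: the result set accumulates numbers[i] + numbers[j] for unvisited-after-i j
lemma fold0_eq (numbers : List Int) :
    ∀ (l : List Nat) (r : PySem.Set Int), (∀ k ∈ l, k < numbers.length) →
    l.foldl (fun (st : List Bool × PySem.Set Int) (k : Nat) =>
        if st.1.getD k false = false then
          ((dfsA numbers 1 (st.1.set k true) [numbers.getD k 0] st.2).1.set k false,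
           (dfsA numbers 1 (st.1.set k true) [numbers.getD k 0] st.2).2)
        else st) (List.replicate numbers.length false, r)
      = (List.replicate numbers.length false,
         l.foldl (fun r i => (List.range numbers.length).foldl
            (fun r j => if ((List.replicate numbers.length false).set i true).getD j false = false
                        then PySem.Set.add r (numbers.getD i 0 + numbers.getD j 0) else r) r) r) := by
  intro l
  induction l with
  | nil => intro r _; rfl
  | cons k t ih =>
    intro r hl
    have hk : k < numbers.length := hl k List.mem_cons_self
    simp only [List.foldl_cons]
    have hvk : (List.replicate numbers.length false).getD k false = false := by
      simp [List.getD]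
    rw [if_pos hvk, dfsA_one]
    simp only
    rw [List.set_set, set_false_self _ k hvk]
    exact ih _ (fun k2 hk2 => hl k2 (List.mem_cons_of_mem _ hk2))

lemma dfsA_top (numbers : List Int) :
    dfsA numbers 2 (List.replicate numbers.length false) [] PySem.Set.empty =
      (List.replicate numbers.length false,
       (List.range numbers.length).foldl
         (fun r i => (List.range numbers.length).foldl
            (fun r j => if ((List.replicate numbers.length false).set i true).getD j false = false
                        then PySem.Set.add r (numbers.getD i 0 + numbers.getD j 0) else r) r)
         PySem.Set.empty) := by
  rw [show (2 : Nat) = Nat.succ 1 from rfl]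
  unfold dfsA
  rw [if_neg (by simp)]
  simp only [PySem.List.len_eq, PySem.List.pyRange_zero_nat, List.foldl_map,
    PySem.List.pyGetD_natCast, PySem.List.pySetD_natCast, List.nil_append]
  exact fold0_eq numbers _ _ (fun k hk => List.mem_range.mp hk)

-- ===== VERDICT (by name: the statement is the Claim_ definition above) =====
theorem solution_spec : Claim_equal_solution := by
  intro numbers _
  unfold Spec_solution solution solution_alt
  simp only [dfsA_top]
  apply (PySem.List.sorted_id_eq_sorted_id_iff_perm _ _).mpr
  refine (List.perm_ext_iff_of_nodup
    (nodup_foldl_foldl_addIf _ _ _ _ _ List.nodup_nil)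
    (nodup_foldl_foldl_add _ _ _ _ List.nodup_nil)).mpr ?_
  intro x
  rw [mem_foldl_foldl_addIf, mem_foldl_foldl_add]
  simp only [List.mem_range, PySem.List.mem_pyRange_one, List.not_mem_nil, false_or,
    PySem.List.len_eq]
  constructor
  · rintro ⟨i, hi, j, hj, hcond, hx⟩
    have hne : j ≠ i := (replicate_set_getD_iff _ i j hi).mp hcond
    rcases Nat.lt_or_ge i j with hij | hij
    · refine ⟨(i : Int), ⟨by omega, by exact_mod_cast hi⟩, (j : Int),
        ⟨by exact_mod_cast hij, by exact_mod_cast hj⟩, ?_⟩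
      simpa [PySem.List.pyGetD_natCast] using hx
    · have hji : j < i := by omega
      refine ⟨(j : Int), ⟨by omega, by exact_mod_cast hj⟩, (i : Int),
        ⟨by exact_mod_cast hji, by exact_mod_cast hi⟩, ?_⟩
      rw [hx]
      simp [PySem.List.pyGetD_natCast, Int.add_comm]
  · rintro ⟨i, ⟨hi0, hin⟩, j, ⟨hij, hjn⟩, hx⟩
    have hj0 : (0 : Int) ≤ j := by omega
    have hiN : i.toNat < numbers.length := by omega
    have hjN : j.toNat < numbers.length := by omega
    refine ⟨i.toNat, hiN, j.toNat, hjN, ?_, ?_⟩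
    · exact (replicate_set_getD_iff _ _ _ hiN).mpr (by omega)
    · rw [hx, PySem.List.pyGetD_eq_getElem numbers 0 hi0 (by simpa using hin),
        PySem.List.pyGetD_eq_getElem numbers 0 hj0 (by simpa using hjn)]
      simp [List.getD, hiN, hjN]
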